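-- pv_equiv track=rewrite | github.com/krikodium/thechinchon | backend/server.py | is_valid_set
-- ===== SOURCE A (Python) =====
-- def is_valid_set(cards):
--     """Check if cards form a valid set (same rank, different suits)"""
--     if len(cards) < 3:
--         return False
--
--     rank = cards[0]['rank']
--     suits = set()
--
--     for card in cards:
--         if card['rank'] != rank:
--             return False
--         if card['suit'] in suits:
--             return False
--         suits.add(card['suit'])
--
--     return True
-- ===== SOURCE B (Python) =====
-- def is_valid_set(cards):
--     """Check if cards form a valid set (same rank, different suits)"""
--     if len(cards) < 3:
--         return False
--     suits = sorted(card['suit'] for card in cards)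
--     if any(a == b for a, b in zip(suits, suits[1:])):
--         return False
--     rank = cards[0]['rank']
--     return all(card['rank'] == rank for card in cards)
-- ===== Notes on version B (the rewrite author's own statement) =====
-- stated objective: alternative
-- what changed: Replaces A's single pass with an incremental membership set by a sort-then-scan: sort the suits so any duplicate becomes adjacent, reject on an equal neighbour pair, then check all ranks against the first card's rank in a separate pass.
import Mathlib
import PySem

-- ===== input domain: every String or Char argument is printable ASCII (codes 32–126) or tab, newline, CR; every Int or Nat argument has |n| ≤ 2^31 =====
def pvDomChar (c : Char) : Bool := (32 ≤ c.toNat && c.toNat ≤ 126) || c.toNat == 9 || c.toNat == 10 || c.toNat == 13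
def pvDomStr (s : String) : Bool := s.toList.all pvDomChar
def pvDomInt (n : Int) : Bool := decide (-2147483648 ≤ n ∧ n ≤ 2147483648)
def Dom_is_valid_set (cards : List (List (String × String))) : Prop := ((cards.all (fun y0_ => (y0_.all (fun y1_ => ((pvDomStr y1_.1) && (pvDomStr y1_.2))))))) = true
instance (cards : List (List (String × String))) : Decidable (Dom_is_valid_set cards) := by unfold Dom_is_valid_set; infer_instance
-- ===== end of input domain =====

-- B is a sort-then-scan alternative: sort the suits so duplicates become adjacent, reject on an
-- equal neighbour pair, then check all ranks against the first card's rank in a separate pass.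

-- card[k] : first-match association-list lookup (dict access); none = KeyError, excluded by Pre_
def pvCardGet? (c : List (String × String)) (k : String) : Option String :=
  (c.find? (fun p => p.1 == k)).map (·.2)

-- total form used by the ports, only under Pre_ (the key is present)
def pvCardGet (c : List (String × String)) (k : String) : String :=
  (pvCardGet? c k).getD ""

-- ===== PORT A =====
def isValidSetLoop (r : String) (suits : PySem.Set String) :
    List (List (String × String)) → Bool
  | [] => true
  | card :: rest =>
    if pvCardGet card "rank" ≠ r then false
    else if PySem.Set.contains suits (pvCardGet card "suit") then false
    else isValidSetLoop r (PySem.Set.add suits (pvCardGet card "suit")) rest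

def is_valid_set (cards : List (List (String × String))) : Bool :=
  if cards.length < 3 then false
  else isValidSetLoop (pvCardGet (PySem.List.pyGetD cards 0 []) "rank") PySem.Set.empty cards

-- ===== PORT B =====
def is_valid_set_alt (cards : List (List (String × String))) : Bool :=
  if cards.length < 3 then false
  -- suits = sorted(card['suit'] for card in cards); any(a == b for a, b in zip(suits, suits[1:]))
  else if ((PySem.List.sorted (cards.map (fun card => pvCardGet card "suit")) (fun x => x) false).zip
      ((PySem.List.sorted (cards.map (fun card => pvCardGet card "suit")) (fun x => x) false).drop 1)).any
      (fun p => p.1 == p.2) then false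
  -- rank = cards[0]['rank']; all(card['rank'] == rank for card in cards)
  else cards.all (fun card => pvCardGet card "rank" == pvCardGet (PySem.List.pyGetD cards 0 []) "rank")

-- ===== PRECONDITION & SPEC =====
-- Pre_ excludes inputs with 3+ cards where some card lacks a 'rank' or 'suit' key: there
-- A either raises KeyError or returns False by short-circuiting before the malformed card,
-- while B reads every card's 'suit' eagerly when sorting and raises KeyError.
def Pre_is_valid_set (cards : List (List (String × String))) : Prop :=
  cards.length < 3 ∨
    ∀ c ∈ cards, "rank" ∈ c.map Prod.fst ∧ "suit" ∈ c.map Prod.fst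
instance (cards : List (List (String × String))) : Decidable (Pre_is_valid_set cards) := by
  unfold Pre_is_valid_set; infer_instance

def pvWitness_is_valid_set : (List (List (String × String))) :=
  [[("rank", "1"), ("suit", "a")], [("rank", "1"), ("suit", "b")], [("rank", "1"), ("suit", "c")]]

def Spec_is_valid_set (cards : List (List (String × String))) (out : Bool) : Prop := out = is_valid_set_alt cards
instance (cards : List (List (String × String))) (out : Bool) : Decidable (Spec_is_valid_set cards out) := by unfold Spec_is_valid_set; infer_instance

-- ===== CLAIM (what is proved, stated in full; the proofs are below) =====
def Claim_equal_is_valid_set : Prop := ∀ (cards : List (List (String × String))), Dom_is_valid_set cards → Pre_is_valid_set cards → Spec_is_valid_set cards (is_valid_set cards)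

-- ===== LEMMAS AND PROOFS =====

-- characterisation of A's loop: all ranks equal r, suit list duplicate-free and disjoint from S
lemma isValidSetLoop_eq_true_iff (r : String) (S : PySem.Set String)
    (cs : List (List (String × String))) :
    isValidSetLoop r S cs = true ↔
      (∀ c ∈ cs, pvCardGet c "rank" = r) ∧
      (cs.map (fun c => pvCardGet c "suit")).Nodup ∧
      (∀ c ∈ cs, pvCardGet c "suit" ∉ S) := by
  induction cs generalizing S with
  | nil => simp [isValidSetLoop]
  | cons c rest ih =>
    simp only [isValidSetLoop]
    by_cases hr : pvCardGet c "rank" = r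
    · rw [if_neg (by simpa using hr)]
      by_cases hs : pvCardGet c "suit" ∈ S
      · rw [if_pos ((PySem.Set.contains_iff S _).mpr hs)]
        refine ⟨fun h => by simp at h, ?_⟩
        rintro ⟨-, -, h3⟩
        exact absurd hs (h3 c (by simp))
      · rw [if_neg (fun h => hs ((PySem.Set.contains_iff S _).mp h)), ih]
        constructor
        · rintro ⟨h1, h2, h3⟩
          refine ⟨?_, ?_, ?_⟩
          · intro c' hc'
            rcases List.mem_cons.mp hc' with rfl | hm
            · exact hr
            · exact h1 c' hm
          · rw [List.map_cons, List.nodup_cons]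
            refine ⟨fun hmem => ?_, h2⟩
            rcases List.mem_map.mp hmem with ⟨c', hc', he⟩
            exact h3 c' hc' ((PySem.Set.mem_add S _ _).mpr (Or.inr he))
          · intro c' hc'
            rcases List.mem_cons.mp hc' with rfl | hm
            · exact hs
            · exact fun hS => h3 c' hm ((PySem.Set.mem_add S _ _).mpr (Or.inl hS))
        · rintro ⟨h1, h2, h3⟩
          rw [List.map_cons, List.nodup_cons] at h2
          refine ⟨fun c' h => h1 c' (List.mem_cons.mpr (Or.inr h)), h2.2, ?_⟩
          intro c' hc' hmem
          rcases (PySem.Set.mem_add S _ _).mp hmem with h | h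
          · exact h3 c' (List.mem_cons.mpr (Or.inr hc')) h
          · exact h2.1 (List.mem_map.mpr ⟨c', hc', h⟩)
    · rw [if_pos (by simpa using hr)]
      refine ⟨fun h => by simp at h, ?_⟩
      rintro ⟨h1, -, -⟩
      exact absurd (h1 c (by simp)) hr

-- zip-with-tail scan finds no equal neighbours ↔ the list is an ≠-chain
lemma zip_tail_no_eq_iff_chain' (l : List String) :
    ((l.zip (l.drop 1)).any (fun p => p.1 == p.2) = false) ↔ l.IsChain (· ≠ ·) := by
  induction l with
  | nil => simp
  | cons a t ih =>
    cases t with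
    | nil => simp
    | cons b u =>
      simp only [List.drop_succ_cons, List.drop_zero, List.zip_cons_cons, List.any_cons,
        Bool.or_eq_false_iff, beq_eq_false_iff_ne, List.isChain_cons_cons, ne_eq] at *
      exact and_congr Iff.rfl ih

-- in a ≤-sorted list, no equal neighbours ↔ no duplicates at all
lemma chain'_ne_iff_nodup_of_pairwise_le (s : List String)
    (h : s.Pairwise (· ≤ ·)) : s.IsChain (· ≠ ·) ↔ s.Nodup := by
  induction s with
  | nil => simp
  | cons a t ih =>
    rcases List.pairwise_cons.mp h with ⟨h1, h2⟩
    cases t with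
    | nil => simp
    | cons b u =>
      rw [List.isChain_cons_cons, List.nodup_cons, ih h2]
      refine and_congr ?_ Iff.rfl
      constructor
      · intro hab hmem
        have hb : a < b := lt_of_le_of_ne (h1 b (by simp)) hab
        rcases List.mem_cons.mp hmem with rfl | hu
        · exact hab rfl
        · have : b ≤ a := (List.pairwise_cons.mp h2).1 a hu
          exact absurd (lt_of_lt_of_le hb this) (lt_irrefl a)
      · intro hnm hab
        exact hnm (hab ▸ List.mem_cons_self ..)

-- the sorted-suits scan accepts ↔ the original suit list has no duplicates
lemma sorted_scan_iff_nodup (l : List String) :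
    (((PySem.List.sorted l (fun x => x) false).zip
        ((PySem.List.sorted l (fun x => x) false).drop 1)).any (fun p => p.1 == p.2) = false)
      ↔ l.Nodup := by
  rw [zip_tail_no_eq_iff_chain',
    chain'_ne_iff_nodup_of_pairwise_le _ (PySem.List.sorted_pairwise l (fun x => x))]
  exact (PySem.List.sorted_perm l (fun x => x) false).nodup_iff

-- ===== VERDICT (by name: the statement is the Claim_ definition above) =====
theorem is_valid_set_spec : Claim_equal_is_valid_set := by
  intro cards _ _
  unfold Spec_is_valid_set is_valid_set is_valid_set_alt
  by_cases h3 : cards.length < 3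
  · simp [h3]
  · rw [if_neg h3, if_neg h3]
    obtain ⟨c0, rest, rfl⟩ : ∃ c0 rest, cards = c0 :: rest := by
      cases cards with
      | nil => simp at h3
      | cons a t => exact ⟨a, t, rfl⟩
    rw [PySem.List.pyGetD_zero_cons]
    cases hdup : (((PySem.List.sorted ((c0 :: rest).map (fun card => pvCardGet card "suit")) (fun x => x) false).zip
        ((PySem.List.sorted ((c0 :: rest).map (fun card => pvCardGet card "suit")) (fun x => x) false).drop 1)).any
        (fun p => p.1 == p.2)) with
    | true =>
      rw [if_pos rfl, Bool.eq_iff_iff]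
      simp only [Bool.false_eq_true, iff_false]
      rw [isValidSetLoop_eq_true_iff]
      rintro ⟨-, h2, -⟩
      have := (sorted_scan_iff_nodup ((c0 :: rest).map (fun card => pvCardGet card "suit"))).mpr h2
      rw [hdup] at this
      exact Bool.true_eq_false.mp this
    | false =>
      rw [if_neg Bool.false_ne_true]
      rw [Bool.eq_iff_iff, isValidSetLoop_eq_true_iff]
      simp only [List.all_eq_true, beq_iff_eq]
      have hnd := (sorted_scan_iff_nodup ((c0 :: rest).map (fun card => pvCardGet card "suit"))).mp hdup
      constructor
      · rintro ⟨h1, -, -⟩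
        exact fun c hc => h1 c hc
      · intro hall
        exact ⟨hall, hnd, fun c _ hm => by simp [PySem.Set.empty] at hm⟩
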